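-- pv_equiv track=rewrite | github.com/KMORaza/leetcode-solutions | LeetCode Solutions/1034.py | colorBorder
-- ===== SOURCE A (Python) =====
-- from typing import List
-- from collections import deque
--
-- def colorBorder(grid: List[List[int]], row: int, col: int, color: int) -> List[List[int]]:
--     def bfs(start_row: int, start_col: int) -> List[tuple]:
--         component = set()
--         border = set()
--         queue = deque([(start_row, start_col)])
--         original_color = grid[start_row][start_col]
--         while queue:
--             r, c = queue.popleft()
--             if (r, c) in component:
--                 continue
--             component.add((r, c))
--             is_border = False
--             for dr, dc in [(-1, 0), (1, 0), (0, -1), (0, 1)]: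
--                 nr, nc = r + dr, c + dc
--                 if 0 <= nr < len(grid) and 0 <= nc < len(grid[0]):
--                     if grid[nr][nc] == original_color:
--                         if (nr, nc) not in component:
--                             queue.append((nr, nc))
--                     else:
--                         is_border = True
--                 else:
--                     is_border = True
--             if is_border:
--                 border.add((r, c))
--         return component, border
--     component, border = bfs(row, col)
--     for r, c in border:
--         grid[r][c] = color
--     return grid
-- ===== SOURCE B (Python) =====
-- def colorBorder(grid, row, col, color):
--     # Note: like the original, this mutates `grid` in place and returns it.
--     rows, cols = len(grid), len(grid[0])
--     orig = grid[row][col]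
--     # phase 1: plain flood fill -- only collects the connected component
--     component = set()
--     stack = [(row, col)]
--     while stack:
--         cell = stack.pop()
--         if cell in component:
--             continue
--         component.add(cell)
--         r, c = cell
--         for nb in ((r - 1, c), (r + 1, c), (r, c - 1), (r, c + 1)):
--             if 0 <= nb[0] < rows and 0 <= nb[1] < cols \
--                     and grid[nb[0]][nb[1]] == orig and nb not in component:
--                 stack.append(nb)
--     # phase 2: separate pass over the finished component to find its border
--     border = [cell for cell in component
--               if any(not (0 <= nb[0] < rows and 0 <= nb[1] < cols) or nb not in component
--                      for nb in ((cell[0] - 1, cell[1]), (cell[0] + 1, cell[1]),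
--                                 (cell[0], cell[1] - 1), (cell[0], cell[1] + 1)))]
--     # phase 3: recolor the border
--     for r, c in border:
--         grid[r][c] = color
--     return grid
-- ===== Notes on version B (the rewrite author's own statement) =====
-- stated objective: alternative
-- what changed: A interleaves border detection with the BFS (testing neighbor colors while popping a deque); B decomposes the job into three separate phases: a plain stack-based flood fill that only collects the component set, then a second pass over the finished component that marks a cell as border when a neighbor is out of bounds or outside the component, then a recoloring pass.
-- outside the precondition, e.g. on colorBorder([[1, 2], [5]], 0, 0, 9): A returns [[9, 2], [5]], B returns [[9, 2], [5]]
import Mathlib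
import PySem

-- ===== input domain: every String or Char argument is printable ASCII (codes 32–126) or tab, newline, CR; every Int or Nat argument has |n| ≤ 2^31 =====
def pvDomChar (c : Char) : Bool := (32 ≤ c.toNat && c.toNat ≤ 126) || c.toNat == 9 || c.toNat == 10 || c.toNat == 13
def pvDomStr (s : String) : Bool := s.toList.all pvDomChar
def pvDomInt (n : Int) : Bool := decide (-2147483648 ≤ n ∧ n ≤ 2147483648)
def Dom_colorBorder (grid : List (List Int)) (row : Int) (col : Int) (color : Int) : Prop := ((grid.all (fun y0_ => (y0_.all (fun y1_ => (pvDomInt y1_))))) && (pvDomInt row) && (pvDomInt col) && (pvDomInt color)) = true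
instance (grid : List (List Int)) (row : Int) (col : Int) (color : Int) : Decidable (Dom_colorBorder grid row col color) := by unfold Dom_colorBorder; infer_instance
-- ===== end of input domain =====

-- B separates A's interleaved BFS into three phases (plain flood fill, then a border pass over
-- the finished component, then recoloring); equivalence is about the RETURN value only (each
-- Python original also mutates `grid` in place, and they mutate it identically).

-- ===== PORT A =====
-- shared atomic helpers (both Pythons do the same bounds test, cell read and cell write)
def pvIn (grid : List (List Int)) (r c : Int) : Bool :=
  decide (0 ≤ r) && decide (r < (grid.length : Int)) && decide (0 ≤ c) && decide (c < ((grid.headD []).length : Int))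

def pvVal (grid : List (List Int)) (r c : Int) : Int :=
  PySem.List.pyGetD (PySem.List.pyGetD grid r []) c 0

def pvSet (grid : List (List Int)) (r c v : Int) : List (List Int) :=
  PySem.List.pySetD grid r (PySem.List.pySetD (PySem.List.pyGetD grid r []) c v)

-- all in-bounds cells, for the loops' termination measure
def pvCells (grid : List (List Int)) : List (Int × Int) :=
  (PySem.List.pyRange 0 grid.length 1).flatMap
    (fun r => (PySem.List.pyRange 0 ((grid.headD []).length : Int) 1).map (fun c => (r, c)))

theorem pv_mem_cells {grid : List (List Int)} {x : Int × Int}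
    (h : pvIn grid x.1 x.2 = true) : x ∈ pvCells grid := by
  simp only [pvIn, Bool.and_eq_true, decide_eq_true_eq] at h
  simp only [pvCells, List.mem_flatMap, List.mem_map, PySem.List.mem_pyRange_one]
  exact ⟨x.1, ⟨h.1.1.1, h.1.1.2⟩, x.2, ⟨h.1.2, h.2⟩, rfl⟩

theorem pv_filter_ne_lt (l : List (Int × Int)) (x : Int × Int) (hx : x ∈ l) :
    (l.filter (fun z => decide (z ≠ x))).length < l.length := by
  induction l with
  | nil => cases hx
  | cons a l ih =>
    by_cases ha : a = x
    · subst ha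
      rw [List.filter_cons_of_neg (by simp)]
      exact Nat.lt_succ_of_le (by simpa using List.length_filter_le _ l)
    · have hx' : x ∈ l := by
        rcases List.mem_cons.mp hx with h | h
        · exact absurd h.symm ha
        · exact h
      rw [List.filter_cons_of_pos (by simp [ha])]
      simpa using Nat.succ_lt_succ (ih hx')

theorem pv_filter_lt (U s : List (Int × Int)) (x : Int × Int) (hxU : x ∈ U) (hxs : x ∉ s) :
    (U.filter (fun z => decide (z ∉ s ++ [x]))).length <
      (U.filter (fun z => decide (z ∉ s))).length := by
  have key : (fun z : Int × Int => decide (z ∉ s ++ [x])) =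
      (fun z : Int × Int => decide (z ≠ x) && decide (z ∉ s)) := by
    funext z; by_cases h1 : z ∈ s <;> by_cases h2 : z = x <;> simp [h1, h2]
  rw [key, ← List.filter_filter]
  have hxf : x ∈ U.filter (fun z => decide (z ∉ s)) :=
    List.mem_filter.mpr ⟨hxU, by simpa using hxs⟩
  exact pv_filter_ne_lt _ _ hxf

theorem pv_filter_le (U s : List (Int × Int)) (x : Int × Int) :
    (U.filter (fun z => decide (z ∉ s ++ [x]))).length ≤
      (U.filter (fun z => decide (z ∉ s))).length := by
  apply List.Sublist.length_le
  apply List.monotone_filter_right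
  intro z hz
  simp only [decide_eq_true_eq] at hz ⊢
  exact fun hzs => hz (List.mem_append_left _ hzs)

def pvOffsets : List (Int × Int) := [(-1, 0), (1, 0), (0, -1), (0, 1)]

-- a neighbour is "clean" when it is in bounds and carries the original colour
def cleanB (grid : List (List Int)) (orig : Int) (nb : Int × Int) : Bool :=
  pvIn grid nb.1 nb.2 && pvVal grid nb.1 nb.2 == orig

-- the inner `for dr, dc in [...]` of A's BFS body: collects the cells to enqueue and the is_border flag
def scanA (grid : List (List Int)) (orig : Int) (comp : List (Int × Int)) (x : Int × Int) :
    List (Int × Int) → List (Int × Int) × Bool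
  | [] => ([], false)
  | d :: ds =>
    let nr := x.1 + d.1
    let nc := x.2 + d.2
    let rest := scanA grid orig comp x ds
    if pvIn grid nr nc then
      if pvVal grid nr nc == orig then
        (if (nr, nc) ∈ comp then rest.1 else (nr, nc) :: rest.1, rest.2)
      else (rest.1, true)
    else (rest.1, true)

theorem scanA_spec (grid : List (List Int)) (orig : Int) (comp : List (Int × Int))
    (x : Int × Int) (offs : List (Int × Int)) :
    scanA grid orig comp x offs =
      (((offs.map (fun d => (x.1 + d.1, x.2 + d.2))).filter (cleanB grid orig)).filter
          (fun nb => decide (nb ∉ comp)),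
        (offs.map (fun d => (x.1 + d.1, x.2 + d.2))).any (fun nb => !(cleanB grid orig nb))) := by
  induction offs with
  | nil => rfl
  | cons d ds ih =>
    simp only [scanA, ih, List.map_cons, List.filter_cons, List.any_cons, cleanB]
    by_cases hin : pvIn grid (x.1 + d.1) (x.2 + d.2) = true
    · by_cases hv : (pvVal grid (x.1 + d.1) (x.2 + d.2) == orig) = true
      · by_cases hc : (x.1 + d.1, x.2 + d.2) ∈ comp
        · simp [hin, hv, hc]
        · simp [hin, hv, hc]
      · simp [hin, Bool.eq_false_iff.mpr hv]
    · simp [Bool.eq_false_iff.mpr hin]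

theorem scanA_fst_in (grid : List (List Int)) (orig : Int) (comp : List (Int × Int))
    (x : Int × Int) (offs : List (Int × Int)) :
    ∀ y ∈ (scanA grid orig comp x offs).1, pvIn grid y.1 y.2 = true := by
  intro y hy
  rw [scanA_spec] at hy
  have h1 := List.mem_of_mem_filter hy
  have h2 := (List.mem_filter.mp h1).2
  simp only [cleanB, Bool.and_eq_true] at h2
  exact h2.1

-- A's BFS while-loop: the deque is a FIFO (popleft = head, append = ++ [·]);
-- component and border are Python sets
def bfsA (grid : List (List Int)) (orig : Int) (comp bord queue : List (Int × Int)) :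
    List (Int × Int) × List (Int × Int) :=
  match queue with
  | [] => (comp, bord)
  | x :: rest =>
    if x ∈ comp then bfsA grid orig comp bord rest
    else
      bfsA grid orig (PySem.Set.add comp x)
        (if (scanA grid orig (PySem.Set.add comp x) x pvOffsets).2 then PySem.Set.add bord x else bord)
        (rest ++ (scanA grid orig (PySem.Set.add comp x) x pvOffsets).1)
  termination_by
    (((pvCells grid).filter (fun z => decide (z ∉ comp))).length +
       (queue.filter (fun z => !(pvIn grid z.1 z.2))).length,
     queue.length)
  decreasing_by
  · rename_i hmem
    by_cases hin : pvIn grid x.1 x.2 = true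
    · rw [List.filter_cons_of_neg (by simp [hin])]
      apply Prod.Lex.right
      simp
    · apply Prod.Lex.left
      rw [List.filter_cons_of_pos (by simp [hin])]
      simp
  · rename_i hmem
    simp only [PySem.Set.add_of_not_mem hmem]
    have hnil : (scanA grid orig (comp ++ [x]) x pvOffsets).1.filter
        (fun z => !(pvIn grid z.1 z.2)) = [] :=
      List.filter_eq_nil_iff.mpr (fun y hy => by
        simp [scanA_fst_in grid orig (comp ++ [x]) x pvOffsets y hy])
    rw [List.filter_append, hnil, List.append_nil]
    apply Prod.Lex.left
    by_cases hin : pvIn grid x.1 x.2 = true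
    · have h1 := pv_filter_lt (pvCells grid) comp x (pv_mem_cells hin) hmem
      rw [List.filter_cons_of_neg (by simp [hin])]
      omega
    · have h1 := pv_filter_le (pvCells grid) comp x
      rw [List.filter_cons_of_pos (by simp [hin])]
      simp only [List.length_cons]
      omega

def colorBorder (grid : List (List Int)) (row : Int) (col : Int) (color : Int) : List (List Int) :=
  match PySem.List.pyGet? grid row with
  | none => grid  -- Python raises IndexError here (outside Pre_)
  | some rw0 =>
    match PySem.List.pyGet? rw0 col with
    | none => grid  -- Python raises IndexError here (outside Pre_)
    | some orig =>
      let res := bfsA grid orig [] [] [(row, col)]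
      res.2.foldl (fun g x => pvSet g x.1 x.2 color) grid

-- ===== PORT B =====
def pvNbhd (x : Int × Int) : List (Int × Int) :=
  [(x.1 - 1, x.2), (x.1 + 1, x.2), (x.1, x.2 - 1), (x.1, x.2 + 1)]

-- B's phase 1: plain flood fill by an explicit stack (Lean list head = Python stack top),
-- collecting only the component set
def fillB (grid : List (List Int)) (orig : Int) (visited stack : List (Int × Int)) :
    List (Int × Int) :=
  match stack with
  | [] => visited
  | cell :: rest =>
    if cell ∈ visited then fillB grid orig visited rest
    else
      fillB grid orig (PySem.Set.add visited cell)
        (((pvNbhd cell).filter (fun nb =>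
            pvIn grid nb.1 nb.2 && pvVal grid nb.1 nb.2 == orig &&
              !(decide (nb ∈ PySem.Set.add visited cell)))).reverse ++ rest)
  termination_by
    (((pvCells grid).filter (fun z => decide (z ∉ visited))).length +
       (stack.filter (fun z => !(pvIn grid z.1 z.2))).length,
     stack.length)
  decreasing_by
  · rename_i hmem
    by_cases hin : pvIn grid cell.1 cell.2 = true
    · rw [List.filter_cons_of_neg (by simp [hin])]
      apply Prod.Lex.right
      simp
    · apply Prod.Lex.left
      rw [List.filter_cons_of_pos (by simp [hin])]
      simp
  · rename_i hmem
    simp only [PySem.Set.add_of_not_mem hmem]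
    have hnil : (((pvNbhd cell).filter (fun nb =>
        pvIn grid nb.1 nb.2 && pvVal grid nb.1 nb.2 == orig &&
          !(decide (nb ∈ visited ++ [cell])))).reverse).filter
        (fun z => !(pvIn grid z.1 z.2)) = [] :=
      List.filter_eq_nil_iff.mpr (fun y hy => by
        have := (List.mem_filter.mp (List.mem_reverse.mp hy)).2
        simp only [Bool.and_eq_true] at this
        simp [this.1.1])
    rw [List.filter_append, hnil, List.nil_append]
    apply Prod.Lex.left
    by_cases hin : pvIn grid cell.1 cell.2 = true
    · have h1 := pv_filter_lt (pvCells grid) visited cell (pv_mem_cells hin) hmem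
      rw [List.filter_cons_of_neg (by simp [hin])]
      omega
    · have h1 := pv_filter_le (pvCells grid) visited cell
      rw [List.filter_cons_of_pos (by simp [hin])]
      simp only [List.length_cons]
      omega

-- B's phase 2 test: a component cell is border when some neighbour is out of bounds or outside the component
def isBorderB (grid : List (List Int)) (comp : List (Int × Int)) (cell : Int × Int) : Bool :=
  (pvNbhd cell).any (fun nb => !(pvIn grid nb.1 nb.2) || !(decide (nb ∈ comp)))

def colorBorder_alt (grid : List (List Int)) (row : Int) (col : Int) (color : Int) : List (List Int) :=
  match PySem.List.pyGet? grid row with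
  | none => grid  -- Python raises IndexError here (outside Pre_)
  | some rw0 =>
    match PySem.List.pyGet? rw0 col with
    | none => grid  -- Python raises IndexError here (outside Pre_)
    | some orig =>
      let comp := fillB grid orig [] [(row, col)]
      let bord := comp.filter (fun cell => isBorderB grid comp cell)
      bord.foldl (fun g x => pvSet g x.1 x.2 color) grid

-- ===== PRECONDITION & SPEC =====
-- Pre_ is the natural domain on which Python A returns: a rectangular non-empty grid and a start
-- index pair accepted by Python list indexing (negative = wraparound). It excludes ragged and
-- empty grids — on most of those A raises IndexError (reading grid[0] or a short row), though on
-- some ragged grids whose short rows are never visited A happens to return.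
def Pre_colorBorder (grid : List (List Int)) (row : Int) (col : Int) (color : Int) : Prop :=
  (∀ rw ∈ grid, rw.length = (grid.headD []).length) ∧
  -(grid.length : Int) ≤ row ∧ row < (grid.length : Int) ∧
  -((grid.headD []).length : Int) ≤ col ∧ col < ((grid.headD []).length : Int)

instance (grid : List (List Int)) (row : Int) (col : Int) (color : Int) :
    Decidable (Pre_colorBorder grid row col color) := by unfold Pre_colorBorder; infer_instance

def pvWitness_colorBorder : List (List Int) × Int × Int × Int := ([[1, 1], [1, 2]], 0, 0, 3)

def Spec_colorBorder (grid : List (List Int)) (row : Int) (col : Int) (color : Int) (out : List (List Int)) : Prop := out = colorBorder_alt grid row col color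
instance (grid : List (List Int)) (row : Int) (col : Int) (color : Int) (out : List (List Int)) : Decidable (Spec_colorBorder grid row col color out) := by unfold Spec_colorBorder; infer_instance

-- ===== CLAIM (what is proved, stated in full; the proofs are below) =====
def Claim_equal_colorBorder : Prop := ∀ (grid : List (List Int)) (row : Int) (col : Int) (color : Int), Dom_colorBorder grid row col color → Pre_colorBorder grid row col color → Spec_colorBorder grid row col color (colorBorder grid row col color)

-- ===== LEMMAS AND PROOFS =====

def nbrsC (grid : List (List Int)) (orig : Int) (x : Int × Int) : List (Int × Int) :=
  (pvNbhd x).filter (cleanB grid orig)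

def ReachP (grid : List (List Int)) (orig : Int) : (Int × Int) → (Int × Int) → Prop :=
  Relation.ReflTransGen (fun a b => b ∈ nbrsC grid orig a)

def isBorderA (grid : List (List Int)) (orig : Int) (x : Int × Int) : Bool :=
  (pvNbhd x).any (fun nb => !(cleanB grid orig nb))

theorem nbrs_clean {grid : List (List Int)} {orig : Int} {a b : Int × Int}
    (h : b ∈ nbrsC grid orig a) : pvIn grid b.1 b.2 = true ∧ pvVal grid b.1 b.2 = orig := by
  rcases List.mem_filter.mp h with ⟨-, hclean⟩
  simpa only [cleanB, Bool.and_eq_true, beq_iff_eq] using hclean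

theorem pv_map_offsets (x : Int × Int) :
    pvOffsets.map (fun d => (x.1 + d.1, x.2 + d.2)) = pvNbhd x := by
  simp only [pvOffsets, pvNbhd, List.map_cons, List.map_nil, List.cons.injEq, Prod.mk.injEq]
  repeat' apply And.intro
  all_goals first | rfl | trivial | ring

theorem scanA_fst (grid : List (List Int)) (orig : Int) (comp : List (Int × Int)) (x : Int × Int) :
    (scanA grid orig comp x pvOffsets).1 =
      (nbrsC grid orig x).filter (fun nb => decide (nb ∉ comp)) := by
  rw [scanA_spec, pv_map_offsets]; rfl

theorem scanA_snd (grid : List (List Int)) (orig : Int) (comp : List (Int × Int)) (x : Int × Int) :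
    (scanA grid orig comp x pvOffsets).2 = isBorderA grid orig x := by
  rw [scanA_spec, pv_map_offsets]; rfl

theorem pushesB_eq (grid : List (List Int)) (orig : Int) (vis : List (Int × Int)) (cell : Int × Int) :
    (pvNbhd cell).filter (fun nb =>
        pvIn grid nb.1 nb.2 && pvVal grid nb.1 nb.2 == orig && !(decide (nb ∈ vis))) =
      (nbrsC grid orig cell).filter (fun nb => decide (nb ∉ vis)) := by
  simp only [nbrsC, List.filter_filter, cleanB]
  apply List.filter_congr
  intro nb _
  by_cases h1 : pvIn grid nb.1 nb.2 = true <;> by_cases h2 : nb ∈ vis <;>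
    simp [h1, h2, Bool.and_comm]

-- ---- bfsA loop lemmas ----

theorem bfsA_mono (grid : List (List Int)) (orig : Int) (comp bord queue : List (Int × Int)) :
    ∀ z ∈ comp, z ∈ (bfsA grid orig comp bord queue).1 := by
  induction comp, bord, queue using bfsA.induct (grid := grid) (orig := orig) with
  | case1 comp bord => intro z hz; rw [bfsA]; exact hz
  | case2 comp bord x rest hmem ih =>
    intro z hz; rw [bfsA]; simp only [if_pos hmem]; exact ih z hz
  | case3 comp bord x rest hmem ih =>
    intro z hz; rw [bfsA]; simp only [if_neg hmem]
    exact ih z (by simp [PySem.Set.mem_add, hz])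

theorem bfsA_mem_queue (grid : List (List Int)) (orig : Int) (comp bord queue : List (Int × Int)) :
    ∀ w ∈ queue, w ∈ (bfsA grid orig comp bord queue).1 := by
  induction comp, bord, queue using bfsA.induct (grid := grid) (orig := orig) with
  | case1 comp bord => intro w hw; cases hw
  | case2 comp bord x rest hmem ih =>
    intro w hw; rw [bfsA]; simp only [if_pos hmem]
    rcases List.mem_cons.mp hw with rfl | hw'
    · exact bfsA_mono grid orig _ _ _ w hmem
    · exact ih w hw'
  | case3 comp bord x rest hmem ih =>
    intro w hw; rw [bfsA]; simp only [if_neg hmem]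
    rcases List.mem_cons.mp hw with rfl | hw'
    · exact bfsA_mono grid orig _ _ _ w (by simp [PySem.Set.mem_add])
    · exact ih w (List.mem_append_left _ hw')

theorem bfsA_closed (grid : List (List Int)) (orig : Int) (comp bord queue : List (Int × Int))
    (hInv : ∀ a ∈ comp, ∀ b ∈ nbrsC grid orig a, b ∈ comp ∨ b ∈ queue) :
    ∀ a ∈ (bfsA grid orig comp bord queue).1, ∀ b ∈ nbrsC grid orig a,
      b ∈ (bfsA grid orig comp bord queue).1 := by
  induction comp, bord, queue using bfsA.induct (grid := grid) (orig := orig) with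
  | case1 comp bord =>
    intro a ha b hb
    rw [bfsA] at ha ⊢
    rcases hInv a ha b hb with h | h
    · exact h
    · cases h
  | case2 comp bord x rest hmem ih =>
    rw [bfsA]; simp only [if_pos hmem]
    apply ih
    intro a ha b hb
    rcases hInv a ha b hb with h | h
    · exact Or.inl h
    · rcases List.mem_cons.mp h with rfl | h'
      · exact Or.inl hmem
      · exact Or.inr h'
  | case3 comp bord x rest hmem ih =>
    rw [bfsA]; simp only [if_neg hmem]
    apply ih
    intro a ha b hb
    rcases (PySem.Set.mem_add _ _ _).mp ha with ha' | rfl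
    · rcases hInv a ha' b hb with h | h
      · exact Or.inl ((PySem.Set.mem_add _ _ _).mpr (Or.inl h))
      · rcases List.mem_cons.mp h with rfl | h'
        · exact Or.inl ((PySem.Set.mem_add _ _ _).mpr (Or.inr rfl))
        · exact Or.inr (List.mem_append_left _ h')
    · by_cases hbc : b ∈ PySem.Set.add comp a
      · exact Or.inl hbc
      · refine Or.inr (List.mem_append_right _ ?_)
        rw [scanA_fst]
        exact List.mem_filter.mpr ⟨hb, decide_eq_true hbc⟩

theorem bfsA_sound (grid : List (List Int)) (orig : Int) (comp bord queue : List (Int × Int)) :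
    ∀ z ∈ (bfsA grid orig comp bord queue).1,
      z ∈ comp ∨ ∃ w ∈ queue, ReachP grid orig w z := by
  induction comp, bord, queue using bfsA.induct (grid := grid) (orig := orig) with
  | case1 comp bord => intro z hz; rw [bfsA] at hz; exact Or.inl hz
  | case2 comp bord x rest hmem ih =>
    intro z hz; rw [bfsA] at hz; simp only [if_pos hmem] at hz
    rcases ih z hz with h | ⟨w, hw, hr⟩
    · exact Or.inl h
    · exact Or.inr ⟨w, List.mem_cons_of_mem _ hw, hr⟩
  | case3 comp bord x rest hmem ih =>
    intro z hz; rw [bfsA] at hz; simp only [if_neg hmem] at hz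
    rcases ih z hz with h | ⟨w, hw, hr⟩
    · rcases (PySem.Set.mem_add _ _ _).mp h with h' | rfl
      · exact Or.inl h'
      · exact Or.inr ⟨z, List.mem_cons_self, Relation.ReflTransGen.refl⟩
    · rcases List.mem_append.mp hw with hw' | hw'
      · exact Or.inr ⟨w, List.mem_cons_of_mem _ hw', hr⟩
      · rw [scanA_fst] at hw'
        exact Or.inr ⟨x, List.mem_cons_self,
          Relation.ReflTransGen.head (List.mem_of_mem_filter hw') hr⟩

theorem bfsA_border (grid : List (List Int)) (orig : Int) (comp bord queue : List (Int × Int))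
    (hb : bord = comp.filter (isBorderA grid orig)) :
    (bfsA grid orig comp bord queue).2 =
      (bfsA grid orig comp bord queue).1.filter (isBorderA grid orig) := by
  induction comp, bord, queue using bfsA.induct (grid := grid) (orig := orig) with
  | case1 comp bord => rw [bfsA]; exact hb
  | case2 comp bord x rest hmem ih => rw [bfsA]; simp only [if_pos hmem]; exact ih hb
  | case3 comp bord x rest hmem ih =>
    rw [bfsA]; simp only [if_neg hmem]
    apply ih
    have hxb : x ∉ bord := by
      rw [hb]; intro hxb; exact hmem (List.mem_of_mem_filter hxb)
    simp only [scanA_snd]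
    rw [PySem.Set.add_of_not_mem hmem, hb, List.filter_append]
    by_cases hib : isBorderA grid orig x = true
    · rw [dif_pos hib, PySem.Set.add_of_not_mem (hb ▸ hxb)]
      simp [hib]
    · rw [dif_neg hib]
      simp [Bool.eq_false_iff.mpr hib]

-- ---- fillB loop lemmas ----

theorem fillB_mono (grid : List (List Int)) (orig : Int) (visited stack : List (Int × Int)) :
    ∀ z ∈ visited, z ∈ fillB grid orig visited stack := by
  induction visited, stack using fillB.induct (grid := grid) (orig := orig) with
  | case1 visited => intro z hz; rw [fillB]; exact hz
  | case2 visited cell rest hmem ih =>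
    intro z hz; rw [fillB]; simp only [if_pos hmem]; exact ih z hz
  | case3 visited cell rest hmem ih =>
    intro z hz; rw [fillB]; simp only [if_neg hmem]
    exact ih z (by simp [PySem.Set.mem_add, hz])

theorem fillB_mem_stack (grid : List (List Int)) (orig : Int) (visited stack : List (Int × Int)) :
    ∀ w ∈ stack, w ∈ fillB grid orig visited stack := by
  induction visited, stack using fillB.induct (grid := grid) (orig := orig) with
  | case1 visited => intro w hw; cases hw
  | case2 visited cell rest hmem ih =>
    intro w hw; rw [fillB]; simp only [if_pos hmem]
    rcases List.mem_cons.mp hw with rfl | hw'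
    · exact fillB_mono grid orig _ _ w hmem
    · exact ih w hw'
  | case3 visited cell rest hmem ih =>
    intro w hw; rw [fillB]; simp only [if_neg hmem]
    rcases List.mem_cons.mp hw with rfl | hw'
    · exact fillB_mono grid orig _ _ w (by simp [PySem.Set.mem_add])
    · exact ih w (List.mem_append_right _ hw')

theorem fillB_closed (grid : List (List Int)) (orig : Int) (visited stack : List (Int × Int))
    (hInv : ∀ a ∈ visited, ∀ b ∈ nbrsC grid orig a, b ∈ visited ∨ b ∈ stack) :
    ∀ a ∈ fillB grid orig visited stack, ∀ b ∈ nbrsC grid orig a,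
      b ∈ fillB grid orig visited stack := by
  induction visited, stack using fillB.induct (grid := grid) (orig := orig) with
  | case1 visited =>
    intro a ha b hb
    rw [fillB] at ha ⊢
    rcases hInv a ha b hb with h | h
    · exact h
    · cases h
  | case2 visited cell rest hmem ih =>
    rw [fillB]; simp only [if_pos hmem]
    apply ih
    intro a ha b hb
    rcases hInv a ha b hb with h | h
    · exact Or.inl h
    · rcases List.mem_cons.mp h with rfl | h'
      · exact Or.inl hmem
      · exact Or.inr h'
  | case3 visited cell rest hmem ih =>
    rw [fillB]; simp only [if_neg hmem]
    apply ih
    intro a ha b hb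
    rcases (PySem.Set.mem_add _ _ _).mp ha with ha' | rfl
    · rcases hInv a ha' b hb with h | h
      · exact Or.inl ((PySem.Set.mem_add _ _ _).mpr (Or.inl h))
      · rcases List.mem_cons.mp h with rfl | h'
        · exact Or.inl ((PySem.Set.mem_add _ _ _).mpr (Or.inr rfl))
        · exact Or.inr (List.mem_append_right _ h')
    · by_cases hbc : b ∈ PySem.Set.add visited a
      · exact Or.inl hbc
      · refine Or.inr (List.mem_append_left _ ?_)
        rw [List.mem_reverse, pushesB_eq]
        exact List.mem_filter.mpr ⟨hb, decide_eq_true hbc⟩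

theorem fillB_sound (grid : List (List Int)) (orig : Int) (visited stack : List (Int × Int)) :
    ∀ z ∈ fillB grid orig visited stack,
      z ∈ visited ∨ ∃ w ∈ stack, ReachP grid orig w z := by
  induction visited, stack using fillB.induct (grid := grid) (orig := orig) with
  | case1 visited => intro z hz; rw [fillB] at hz; exact Or.inl hz
  | case2 visited cell rest hmem ih =>
    intro z hz; rw [fillB] at hz; simp only [if_pos hmem] at hz
    rcases ih z hz with h | ⟨w, hw, hr⟩
    · exact Or.inl h
    · exact Or.inr ⟨w, List.mem_cons_of_mem _ hw, hr⟩
  | case3 visited cell rest hmem ih =>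
    intro z hz; rw [fillB] at hz; simp only [if_neg hmem] at hz
    rcases ih z hz with h | ⟨w, hw, hr⟩
    · rcases (PySem.Set.mem_add _ _ _).mp h with h' | rfl
      · exact Or.inl h'
      · exact Or.inr ⟨z, List.mem_cons_self, Relation.ReflTransGen.refl⟩
    · rcases List.mem_append.mp hw with hw' | hw'
      · rw [List.mem_reverse, pushesB_eq] at hw'
        exact Or.inr ⟨cell, List.mem_cons_self,
          Relation.ReflTransGen.head (List.mem_of_mem_filter hw') hr⟩
      · exact Or.inr ⟨w, List.mem_cons_of_mem _ hw', hr⟩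

-- ---- reachability facts ----

theorem reach_ends {grid : List (List Int)} {orig : Int} {s z : Int × Int}
    (h : ReachP grid orig s z) :
    z = s ∨ (pvIn grid z.1 z.2 = true ∧ pvVal grid z.1 z.2 = orig) := by
  induction h with
  | refl => exact Or.inl rfl
  | tail _ hstep _ => exact Or.inr (nbrs_clean hstep)

theorem reach_mem_closed {grid : List (List Int)} {orig : Int} {s z : Int × Int}
    {S : List (Int × Int)} (hmem : s ∈ S)
    (hcl : ∀ a ∈ S, ∀ b ∈ nbrsC grid orig a, b ∈ S) (h : ReachP grid orig s z) : z ∈ S := by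
  induction h with
  | refl => exact hmem
  | tail _ hstep ih => exact hcl _ ih _ hstep

-- ---- component characterisations ----

theorem bfsA_char (grid : List (List Int)) (orig : Int) (row col : Int) (z : Int × Int) :
    z ∈ (bfsA grid orig [] [] [(row, col)]).1 ↔ ReachP grid orig (row, col) z := by
  constructor
  · intro hz
    rcases bfsA_sound grid orig [] [] [(row, col)] z hz with h | ⟨w, hw, hr⟩
    · cases h
    · rcases List.mem_singleton.mp hw with rfl; exact hr
  · intro hr
    refine reach_mem_closed ?_ (bfsA_closed grid orig [] [] [(row, col)] (by simp)) hr
    exact bfsA_mem_queue grid orig [] [] [(row, col)] _ (List.mem_singleton_self _ )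

theorem fillB_char (grid : List (List Int)) (orig : Int) (row col : Int) (z : Int × Int) :
    z ∈ fillB grid orig [] [(row, col)] ↔ ReachP grid orig (row, col) z := by
  constructor
  · intro hz
    rcases fillB_sound grid orig [] [(row, col)] z hz with h | ⟨w, hw, hr⟩
    · cases h
    · rcases List.mem_singleton.mp hw with rfl; exact hr
  · intro hr
    refine reach_mem_closed ?_ (fillB_closed grid orig [] [(row, col)] (by simp)) hr
    exact fillB_mem_stack grid orig [] [(row, col)] _ (List.mem_singleton_self _ )

-- ---- the two border lists have the same members ----

theorem border_mem_iff (grid : List (List Int)) (orig : Int) (row col : Int)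
    (hvs : pvIn grid row col = true → pvVal grid row col = orig) (z : Int × Int) :
    z ∈ (bfsA grid orig [] [] [(row, col)]).1.filter (isBorderA grid orig) ↔
      z ∈ (fillB grid orig [] [(row, col)]).filter
            (fun cell => isBorderB grid (fillB grid orig [] [(row, col)]) cell) := by
  have hCB : ∀ y, y ∈ fillB grid orig [] [(row, col)] ↔ ReachP grid orig (row, col) y :=
    fillB_char grid orig row col
  have hCA : ∀ y, y ∈ (bfsA grid orig [] [] [(row, col)]).1 ↔ ReachP grid orig (row, col) y :=
    bfsA_char grid orig row col
  simp only [List.mem_filter]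
  have hborder : ∀ y, ReachP grid orig (row, col) y →
      (isBorderA grid orig y = true ↔
        isBorderB grid (fillB grid orig [] [(row, col)]) y = true) := by
    intro y hy
    simp only [isBorderA, isBorderB, List.any_eq_true]
    constructor
    · rintro ⟨nb, hnb, hbad⟩
      refine ⟨nb, hnb, ?_⟩
      by_cases hin : pvIn grid nb.1 nb.2 = true
      · simp only [Bool.not_eq_true', cleanB, Bool.and_eq_false_iff] at hbad
        rcases hbad with hbad | hbad
        · rw [hin] at hbad; cases hbad
        · have hnotm : nb ∉ fillB grid orig [] [(row, col)] := by
            intro hmem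
            rcases reach_ends ((hCB nb).mp hmem) with heq | hprops
            · rw [heq] at hin hbad
              have := hvs hin
              simp [this] at hbad
            · simp [hprops.2] at hbad
          simp [hnotm]
      · simp [hin]
    · rintro ⟨nb, hnb, hbad⟩
      refine ⟨nb, hnb, ?_⟩
      simp only [Bool.or_eq_true, Bool.not_eq_true', decide_eq_false_iff_not] at hbad
      simp only [Bool.not_eq_true', cleanB, Bool.and_eq_false_iff]
      rcases hbad with hbad | hbad
      · exact Or.inl hbad
      · by_cases hin2 : pvIn grid nb.1 nb.2 = true
        · by_cases hval : pvVal grid nb.1 nb.2 = orig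
          · exfalso
            apply hbad
            apply (hCB nb).mpr
            exact Relation.ReflTransGen.tail hy
              (List.mem_filter.mpr ⟨hnb, by simp [cleanB, hin2, hval]⟩)
          · exact Or.inr (by simp [hval])
        · exact Or.inl (Bool.eq_false_iff.mpr hin2)
  constructor
  · rintro ⟨hz, hbz⟩
    have hr := (hCA z).mp hz
    exact ⟨(hCB z).mpr hr, (hborder z hr).mp hbz⟩
  · rintro ⟨hz, hbz⟩
    have hr := (hCB z).mp hz
    exact ⟨(hCA z).mpr hr, (hborder z hr).mpr hbz⟩

-- ---- Python indexing with wraparound, physically ----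

def pvPhys (n : Nat) (i : Int) : Nat := (if i < 0 then i + n else i).toNat

theorem pvPhys_lt (n : Nat) (i : Int) (h0 : -(n : Int) ≤ i) (h1 : i < (n : Int)) :
    pvPhys n i < n := by
  simp only [pvPhys]; split_ifs <;> omega

theorem pyIdx?_phys (n : Nat) (i : Int) (h0 : -(n : Int) ≤ i) (h1 : i < (n : Int)) :
    PySem.List.pyIdx? n i = some (pvPhys n i) := by
  simp only [PySem.List.pyIdx?, pvPhys]
  by_cases h : 0 ≤ i
  · rw [if_pos h, if_pos h1, if_neg (by omega : ¬ i < 0)]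
  · rw [if_neg h, if_pos h0, if_pos (by omega : i < 0)]
    congr 1
    omega

theorem pyGet?_phys {α : Type} (xs : List α) (i : Int) (h0 : -(xs.length : Int) ≤ i)
    (h1 : i < (xs.length : Int)) : PySem.List.pyGet? xs i = xs[pvPhys xs.length i]? := by
  simp [PySem.List.pyGet?, pyIdx?_phys _ _ h0 h1]

theorem pyGetD_phys {α : Type} (xs : List α) (i : Int) (d : α) (h0 : -(xs.length : Int) ≤ i)
    (h1 : i < (xs.length : Int)) :
    PySem.List.pyGetD xs i d = xs.getD (pvPhys xs.length i) d := by
  rw [PySem.List.pyGetD, pyGet?_phys _ _ h0 h1, List.getD_eq_getElem?_getD]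

theorem pySetD_phys {α : Type} (xs : List α) (i : Int) (v : α) (h0 : -(xs.length : Int) ≤ i)
    (h1 : i < (xs.length : Int)) :
    PySem.List.pySetD xs i v = xs.set (pvPhys xs.length i) v := by
  simp [PySem.List.pySetD, PySem.List.pySet?, pyIdx?_phys _ _ h0 h1]

-- ---- the recolouring fold, pointwise ----

def wrAll (color : Int) (L : List (Int × Int)) (g : List (List Int)) : List (List Int) :=
  L.foldl (fun g x => pvSet g x.1 x.2 color) g

theorem pvSet_eq_set (g : List (List Int)) (a b v : Int)
    (ha0 : -(g.length : Int) ≤ a) (ha1 : a < (g.length : Int))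
    (hb0 : -((g.getD (pvPhys g.length a) []).length : Int) ≤ b)
    (hb1 : b < ((g.getD (pvPhys g.length a) []).length : Int)) :
    pvSet g a b v = g.set (pvPhys g.length a)
      ((g.getD (pvPhys g.length a) []).set (pvPhys (g.getD (pvPhys g.length a) []).length b) v) := by
  rw [pvSet, pyGetD_phys g a [] ha0 ha1, pySetD_phys _ b v hb0 hb1, pySetD_phys g a _ ha0 ha1]

theorem pvSet_len (g : List (List Int)) (a b v : Int) :
    (pvSet g a b v).length = g.length := by
  simp [pvSet, PySem.List.length_pySetD]

theorem pvSet_row_len (g : List (List Int)) (a b v : Int)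
    (ha0 : -(g.length : Int) ≤ a) (ha1 : a < (g.length : Int))
    (hb0 : -((g.getD (pvPhys g.length a) []).length : Int) ≤ b)
    (hb1 : b < ((g.getD (pvPhys g.length a) []).length : Int)) (r : Nat) :
    ((pvSet g a b v).getD r []).length = (g.getD r []).length := by
  rw [pvSet_eq_set g a b v ha0 ha1 hb0 hb1]
  simp only [List.getD_eq_getElem?_getD, List.getElem?_set]
  by_cases hra : pvPhys g.length a = r
  · subst hra
    by_cases hl : pvPhys g.length a < g.length
    · simp [hl, List.getD_eq_getElem?_getD]
    · simp [hl]
  · simp [hra]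

theorem pvSet_getD (g : List (List Int)) (a b v : Int)
    (ha0 : -(g.length : Int) ≤ a) (ha1 : a < (g.length : Int))
    (hb0 : -((g.getD (pvPhys g.length a) []).length : Int) ≤ b)
    (hb1 : b < ((g.getD (pvPhys g.length a) []).length : Int)) (r c : Nat) :
    ((pvSet g a b v).getD r []).getD c 0 =
      if r = pvPhys g.length a ∧ c = pvPhys (g.getD (pvPhys g.length a) []).length b then v
      else (g.getD r []).getD c 0 := by
  have hla : pvPhys g.length a < g.length := pvPhys_lt _ _ ha0 ha1
  have hlb : pvPhys (g.getD (pvPhys g.length a) []).length b <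
      (g.getD (pvPhys g.length a) []).length := pvPhys_lt _ _ hb0 hb1
  rw [pvSet_eq_set g a b v ha0 ha1 hb0 hb1]
  simp only [List.getD_eq_getElem?_getD, List.getElem?_set]
  by_cases hra : pvPhys g.length a = r
  · subst hra
    simp only [if_pos rfl, if_pos hla]
    by_cases hcb : pvPhys (g.getD (pvPhys g.length a) []).length b = c
    · subst hcb
      have hlb2 : pvPhys (g[pvPhys g.length a]?.getD []).length b <
          (g[pvPhys g.length a]?.getD []).length := by
        simpa [List.getD_eq_getElem?_getD] using hlb
      simp only [List.getD_eq_getElem?_getD] at hlb ⊢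
      simp [List.getElem?_set, hlb2]
    · simp only [List.getD_eq_getElem?_getD] at hlb hcb ⊢
      simp [List.getElem?_set, hcb, Ne.symm hcb]
  · simp [hra, Ne.symm hra]

theorem wr_len (color : Int) (L : List (Int × Int)) (g : List (List Int)) :
    (wrAll color L g).length = g.length := by
  induction L generalizing g with
  | nil => rfl
  | cons x L ih => simp only [wrAll, List.foldl_cons] at ih ⊢; rw [ih, pvSet_len]

-- the py-index-range condition every written cell satisfies
def pvOk (grid : List (List Int)) (x : Int × Int) : Prop :=
  -(grid.length : Int) ≤ x.1 ∧ x.1 < (grid.length : Int) ∧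
    -((grid.headD []).length : Int) ≤ x.2 ∧ x.2 < ((grid.headD []).length : Int)

theorem wr_row_len (color : Int) (grid : List (List Int)) (L : List (Int × Int))
    (hL : ∀ x ∈ L, pvOk grid x)
    (hrect : ∀ r : Nat, r < grid.length → (grid.getD r []).length = (grid.headD []).length) :
    ∀ (g : List (List Int)), g.length = grid.length →
      (∀ r : Nat, (g.getD r []).length = (grid.getD r []).length) →
      ∀ r : Nat, ((wrAll color L g).getD r []).length = (g.getD r []).length := by
  induction L with
  | nil => intro g _ _ r; rfl
  | cons x L ih =>
    intro g hlen hrow r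
    obtain ⟨hx1, hx2, hx3, hx4⟩ := hL x List.mem_cons_self
    have hrl : (g.getD (pvPhys g.length x.1) []).length = (grid.headD []).length := by
      rw [hrow, hrect]
      rw [hlen]
      exact pvPhys_lt _ _ (by omega) (by omega)
    have ha0 : -(g.length : Int) ≤ x.1 := by rw [hlen]; exact hx1
    have ha1 : x.1 < (g.length : Int) := by rw [hlen]; exact hx2
    have hb0 : -((g.getD (pvPhys g.length x.1) []).length : Int) ≤ x.2 := by rw [hrl]; exact hx3
    have hb1 : x.2 < ((g.getD (pvPhys g.length x.1) []).length : Int) := by rw [hrl]; exact hx4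
    rw [show wrAll color (x :: L) g = wrAll color L (pvSet g x.1 x.2 color) from rfl]
    rw [ih (fun y hy => hL y (List.mem_cons_of_mem _ hy)) (pvSet g x.1 x.2 color)
        (by rw [pvSet_len, hlen])
        (fun r' => by rw [pvSet_row_len g x.1 x.2 color ha0 ha1 hb0 hb1]; exact hrow r') r,
      pvSet_row_len g x.1 x.2 color ha0 ha1 hb0 hb1]

theorem wr_pointwise (color : Int) (grid : List (List Int)) (L : List (Int × Int))
    (hL : ∀ x ∈ L, pvOk grid x)
    (hrect : ∀ r : Nat, r < grid.length → (grid.getD r []).length = (grid.headD []).length) :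
    ∀ (g : List (List Int)), g.length = grid.length →
      (∀ r : Nat, (g.getD r []).length = (grid.getD r []).length) →
      ∀ r c : Nat,
        ((wrAll color L g).getD r []).getD c 0 =
          if ∃ x ∈ L, pvPhys grid.length x.1 = r ∧ pvPhys (grid.headD []).length x.2 = c
          then color else (g.getD r []).getD c 0 := by
  induction L with
  | nil => intro g _ _ r c; simp [wrAll]
  | cons x L ih =>
    intro g hlen hrow r c
    obtain ⟨hx1, hx2, hx3, hx4⟩ := hL x List.mem_cons_self
    have hrl : (g.getD (pvPhys g.length x.1) []).length = (grid.headD []).length := by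
      rw [hrow, hrect]
      rw [hlen]
      exact pvPhys_lt _ _ (by omega) (by omega)
    have ha0 : -(g.length : Int) ≤ x.1 := by rw [hlen]; exact hx1
    have ha1 : x.1 < (g.length : Int) := by rw [hlen]; exact hx2
    have hb0 : -((g.getD (pvPhys g.length x.1) []).length : Int) ≤ x.2 := by rw [hrl]; exact hx3
    have hb1 : x.2 < ((g.getD (pvPhys g.length x.1) []).length : Int) := by rw [hrl]; exact hx4
    have hrec := ih (fun y hy => hL y (List.mem_cons_of_mem _ hy)) (pvSet g x.1 x.2 color)
      (by rw [pvSet_len, hlen])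
      (fun r' => by rw [pvSet_row_len g x.1 x.2 color ha0 ha1 hb0 hb1]; exact hrow r') r c
    simp only [wrAll, List.foldl_cons] at hrec ⊢
    rw [hrec, pvSet_getD g x.1 x.2 color ha0 ha1 hb0 hb1 r c]
    have hpa : pvPhys g.length x.1 = pvPhys grid.length x.1 := by rw [hlen]
    have hpb : pvPhys (g.getD (pvPhys g.length x.1) []).length x.2 =
        pvPhys (grid.headD []).length x.2 := by rw [hrl]
    simp only [List.exists_mem_cons_iff]
    by_cases hmem : ∃ y ∈ L, pvPhys grid.length y.1 = r ∧ pvPhys (grid.headD []).length y.2 = c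
    · rw [if_pos hmem, if_pos (Or.inr hmem)]
    · rw [if_neg hmem]
      by_cases hpe : r = pvPhys g.length x.1 ∧
          c = pvPhys (g.getD (pvPhys g.length x.1) []).length x.2
      · rw [if_pos hpe, if_pos (Or.inl ⟨by rw [← hpa, hpe.1], by rw [← hpb, hpe.2]⟩)]
      · rw [if_neg hpe, if_neg ?_]
        rintro (⟨h1, h2⟩ | h)
        · exact hpe ⟨by rw [hpa, h1], by rw [hpb, h2]⟩
        · exact hmem h

theorem grids_ext (g1 g2 : List (List Int)) (hlen : g1.length = g2.length)
    (hrow : ∀ r : Nat, (g1.getD r []).length = (g2.getD r []).length)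
    (hpt : ∀ r c : Nat, ((g1.getD r []).getD c 0) = ((g2.getD r []).getD c 0)) : g1 = g2 := by
  apply List.ext_getElem hlen
  intro r h1 h2
  have hr1 : g1.getD r [] = g1[r] := List.getD_eq_getElem g1 [] h1
  have hr2 : g2.getD r [] = g2[r] := List.getD_eq_getElem g2 [] h2
  have hrl : g1[r].length = g2[r].length := by rw [← hr1, ← hr2]; exact hrow r
  apply List.ext_getElem hrl
  intro c hc1 hc2
  have := hpt r c
  rw [hr1, hr2, List.getD_eq_getElem g1[r] 0 hc1, List.getD_eq_getElem g2[r] 0 hc2] at this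
  exact this

-- ---- assembling the final theorem ----

theorem colorBorder_main (grid : List (List Int)) (row col color : Int)
    (hpre : Pre_colorBorder grid row col color) :
    colorBorder grid row col color = colorBorder_alt grid row col color := by
  obtain ⟨hrect, hr0, hr1, hc0, hc1⟩ := hpre
  have hrn : pvPhys grid.length row < grid.length := pvPhys_lt _ _ hr0 hr1
  have hrowmem : grid[pvPhys grid.length row] ∈ grid := List.getElem_mem _
  have hrlen : grid[pvPhys grid.length row].length = (grid.headD []).length := hrect _ hrowmem
  have hg1 : PySem.List.pyGet? grid row = some grid[pvPhys grid.length row] := by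
    rw [pyGet?_phys grid row hr0 hr1, List.getElem?_eq_getElem hrn]
  have hcn : pvPhys grid[pvPhys grid.length row].length col <
      grid[pvPhys grid.length row].length := by
    apply pvPhys_lt <;> rw [hrlen] <;> omega
  have hg2 : PySem.List.pyGet? grid[pvPhys grid.length row] col =
      some (grid[pvPhys grid.length row][pvPhys grid[pvPhys grid.length row].length col]) := by
    rw [pyGet?_phys grid[pvPhys grid.length row] col (by rw [hrlen]; omega) (by rw [hrlen]; omega),
      List.getElem?_eq_getElem hcn]
  set orig := grid[pvPhys grid.length row][pvPhys grid[pvPhys grid.length row].length col]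
    with horig
  have hvs : pvIn grid row col = true → pvVal grid row col = orig := by
    intro h
    simp only [pvIn, Bool.and_eq_true, decide_eq_true_eq] at h
    rw [pvVal, pyGetD_phys grid row [] hr0 hr1, List.getD_eq_getElem _ _ hrn,
      pyGetD_phys _ col 0 (by rw [hrlen]; omega) (by rw [hrlen]; omega),
      List.getD_eq_getElem _ _ hcn]
  have hrect' : ∀ r : Nat, r < grid.length → (grid.getD r []).length = (grid.headD []).length := by
    intro r hr
    rw [List.getD_eq_getElem _ _ hr]
    exact hrect _ (List.getElem_mem _)
  -- reduce both programs to a recolouring fold over their border list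
  simp only [colorBorder, colorBorder_alt, hg1, hg2]
  have hwr : ∀ (L : List (Int × Int)) (g : List (List Int)),
      List.foldl (fun g x => pvSet g x.1 x.2 color) g L = wrAll color L g := fun _ _ => rfl
  rw [hwr, hwr]
  have hLA := bfsA_border grid orig [] [] [(row, col)] (by simp)
  rw [hLA]
  -- every border cell is py-indexable: it is either the start cell or an in-bounds cell
  have hokA : ∀ x ∈ (bfsA grid orig [] [] [(row, col)]).1.filter (isBorderA grid orig),
      pvOk grid x := by
    intro x hx
    rcases reach_ends ((bfsA_char grid orig row col x).mp (List.mem_of_mem_filter hx)) with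
      rfl | hprops
    · exact ⟨hr0, hr1, hc0, hc1⟩
    · have := hprops.1
      simp only [pvIn, Bool.and_eq_true, decide_eq_true_eq] at this
      exact ⟨by omega, this.1.1.2, by omega, this.2⟩
  have hokB : ∀ x ∈ (fillB grid orig [] [(row, col)]).filter
      (fun cell => isBorderB grid (fillB grid orig [] [(row, col)]) cell), pvOk grid x := by
    intro x hx
    rcases reach_ends ((fillB_char grid orig row col x).mp (List.mem_of_mem_filter hx)) with
      rfl | hprops
    · exact ⟨hr0, hr1, hc0, hc1⟩
    · have := hprops.1
      simp only [pvIn, Bool.and_eq_true, decide_eq_true_eq] at this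
      exact ⟨by omega, this.1.1.2, by omega, this.2⟩
  apply grids_ext
  · rw [wr_len, wr_len]
  · intro r
    rw [wr_row_len color grid _ hokA hrect' grid rfl (fun _ => rfl) r,
      wr_row_len color grid _ hokB hrect' grid rfl (fun _ => rfl) r]
  · intro r c
    rw [wr_pointwise color grid _ hokA hrect' grid rfl (fun _ => rfl) r c,
      wr_pointwise color grid _ hokB hrect' grid rfl (fun _ => rfl) r c]
    by_cases hm : ∃ x ∈ (bfsA grid orig [] [] [(row, col)]).1.filter (isBorderA grid orig),
        pvPhys grid.length x.1 = r ∧ pvPhys (grid.headD []).length x.2 = c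
    · rcases hm with ⟨x, hx, hxe⟩
      rw [if_pos ⟨x, hx, hxe⟩,
        if_pos ⟨x, (border_mem_iff grid orig row col hvs x).mp hx, hxe⟩]
    · rw [if_neg hm, if_neg ?_]
      rintro ⟨x, hx, hxe⟩
      exact hm ⟨x, (border_mem_iff grid orig row col hvs x).mpr hx, hxe⟩

-- ===== VERDICT (by name: the statement is the Claim_ definition above) =====
theorem colorBorder_spec : Claim_equal_colorBorder := by
  intro grid row col color _ hpre
  exact colorBorder_main grid row col color hpre
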